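-- pv_equiv track=rewrite | github.com/kldtz/CharSplit | kirke/utils/osutils.py | _get_highest_version
-- ===== SOURCE A (Python) =====
-- from collections import defaultdict
-- from typing import Any, DefaultDict, Dict, List, Optional, Set, Tuple
--
-- def _get_highest_version(ver_lang_fname_list: List[Tuple[int, Tuple[str, str]]]) \
--     -> List[Tuple[str, str]]:
--     ver_lang_fnames_map = defaultdict(list)  # type: DefaultDict[int, List[Tuple[str, str]]]
--     ver_list = []
--     for ver, lang_fname in ver_lang_fname_list:
--         ver_lang_fnames_map[ver].append(lang_fname)
--         ver_list.append(ver)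
--     highest_ver = sorted(ver_list)[-1]
--     return ver_lang_fnames_map[highest_ver]
-- ===== SOURCE B (Python) =====
-- def _get_highest_version(ver_lang_fname_list):
--     highest = max(ver for ver, _ in ver_lang_fname_list)
--     return [lang_fname for ver, lang_fname in ver_lang_fname_list if ver == highest]
-- ===== Notes on version B (the rewrite author's own statement) =====
-- stated objective: simpler
-- what changed: Replaces the grouping defaultdict plus sorting the full version list with a single max() and an order-preserving filter over the input.
-- outside the precondition, e.g. on _get_highest_version([]): A raises IndexError, B raises ValueError
import Mathlib
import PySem

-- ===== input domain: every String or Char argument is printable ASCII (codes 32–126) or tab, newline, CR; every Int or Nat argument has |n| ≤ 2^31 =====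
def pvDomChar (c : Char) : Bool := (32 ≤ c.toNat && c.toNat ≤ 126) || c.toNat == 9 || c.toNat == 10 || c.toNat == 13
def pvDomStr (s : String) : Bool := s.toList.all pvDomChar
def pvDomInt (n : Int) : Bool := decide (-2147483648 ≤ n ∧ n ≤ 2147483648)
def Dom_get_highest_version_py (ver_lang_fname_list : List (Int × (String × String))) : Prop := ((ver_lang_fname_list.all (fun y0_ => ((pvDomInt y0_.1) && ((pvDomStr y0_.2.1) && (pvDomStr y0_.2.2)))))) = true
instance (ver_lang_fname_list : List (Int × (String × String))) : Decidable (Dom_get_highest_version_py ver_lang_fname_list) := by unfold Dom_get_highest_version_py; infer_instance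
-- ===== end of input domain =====

-- B replaces A's grouping defaultdict plus full sort with a single max() and an
-- order-preserving filter over the input (objective: simpler).

-- ===== PORT A =====
-- loop: builds (ver -> list of lang_fname) dict and the parallel ver_list
def get_highest_version_py (ver_lang_fname_list : List (Int × (String × String))) : List (String × String) :=
  let st := ver_lang_fname_list.foldl
    (fun (st : PySem.Dict Int (List (String × String)) × List Int) p =>
      (st.1.insert p.1 ((st.1.getD p.1 []) ++ [p.2]), st.2 ++ [p.1]))
    (PySem.Dict.empty, [])
  -- highest_ver = sorted(ver_list)[-1]; Python raises IndexError on an empty list,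
  -- excluded by Pre_ (the 'none' branch is unreachable there)
  match PySem.List.pyGet? (PySem.List.sorted st.2 (fun x => x) false) (-1) with
  | some highest => st.1.getD highest []
  | none => []

-- ===== PORT B =====
def get_highest_version_py_alt (ver_lang_fname_list : List (Int × (String × String))) : List (String × String) :=
  -- highest = max(ver for ver, _ in ...); Python raises ValueError on an empty list,
  -- excluded by Pre_ (the 'none' branch is unreachable there)
  match PySem.List.max? (ver_lang_fname_list.map (·.1)) (fun x => x) with
  | some highest => (ver_lang_fname_list.filter (fun p => p.1 == highest)).map (·.2)
  | none => []

-- ===== PRECONDITION & SPEC =====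
-- Pre_ excludes only the empty list, on which A raises IndexError (and B ValueError).
def Pre_get_highest_version_py (ver_lang_fname_list : List (Int × (String × String))) : Prop :=
  ver_lang_fname_list ≠ []
instance (ver_lang_fname_list : List (Int × (String × String))) : Decidable (Pre_get_highest_version_py ver_lang_fname_list) := by unfold Pre_get_highest_version_py; infer_instance

def pvWitness_get_highest_version_py : (List (Int × (String × String))) := [(1, ("en", "f1.txt")), (2, ("de", "f2.txt")), (2, ("fr", "f3.txt"))]

def Spec_get_highest_version_py (ver_lang_fname_list : List (Int × (String × String))) (out : List (String × String)) : Prop := out = get_highest_version_py_alt ver_lang_fname_list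
instance (ver_lang_fname_list : List (Int × (String × String))) (out : List (String × String)) : Decidable (Spec_get_highest_version_py ver_lang_fname_list out) := by unfold Spec_get_highest_version_py; infer_instance

-- ===== CLAIM (what is proved, stated in full; the proofs are below) =====
def Claim_equal_get_highest_version_py : Prop := ∀ (ver_lang_fname_list : List (Int × (String × String))), Dom_get_highest_version_py ver_lang_fname_list → Pre_get_highest_version_py ver_lang_fname_list → Spec_get_highest_version_py ver_lang_fname_list (get_highest_version_py ver_lang_fname_list)

-- ===== LEMMAS AND PROOFS =====

-- xs[-1] of a nonempty list is its last element
theorem pyGet_neg_one_last {α : Type} (s : List α) (h : s ≠ []) :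
    PySem.List.pyGet? s (-1) = some (s.getLast h) := by
  have hl : 0 < s.length := List.length_pos_iff.mpr h
  unfold PySem.List.pyGet? PySem.List.pyIdx?
  split_ifs with h1 h2 h3
  · omega
  · omega
  · show s[s.length - (1:Nat)]? = _
    rw [List.getLast_eq_getElem]
    exact List.getElem?_eq_getElem (by omega)
  · omega

-- the second component of A's loop state accumulates the version list
theorem foldl_snd (l : List (Int × (String × String)))
    (d : PySem.Dict Int (List (String × String))) (acc : List Int) :
    (l.foldl (fun (st : PySem.Dict Int (List (String × String)) × List Int) p =>
        (st.1.insert p.1 ((st.1.getD p.1 []) ++ [p.2]), st.2 ++ [p.1])) (d, acc)).2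
      = acc ++ l.map (·.1) := by
  induction l generalizing d acc with
  | nil => simp
  | cons a t ih => simp [List.foldl_cons, ih]

-- the dict built by A's loop groups: looking up v yields the lang_fnames of the
-- pairs with version v, in input order (on top of whatever d already held at v)
theorem foldl_fst_getD (l : List (Int × (String × String)))
    (d : PySem.Dict Int (List (String × String))) (acc : List Int) (v : Int) :
    ((l.foldl (fun (st : PySem.Dict Int (List (String × String)) × List Int) p =>
        (st.1.insert p.1 ((st.1.getD p.1 []) ++ [p.2]), st.2 ++ [p.1])) (d, acc)).1).getD v []
      = d.getD v [] ++ (l.filter (fun p => p.1 == v)).map (·.2) := by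
  induction l generalizing d acc with
  | nil => simp
  | cons a t ih =>
    rw [List.foldl_cons, ih]
    by_cases hv : v = a.1
    · subst hv
      simp [pysem]
    · have hba : (a.1 == v) = false := by simp [Ne.symm hv]
      simp [pysem, hv, hba]

-- ===== VERDICT (by name: the statement is the Claim_ definition above) =====
theorem get_highest_version_py_spec : Claim_equal_get_highest_version_py := by
  intro l _ hpre
  show get_highest_version_py l = get_highest_version_py_alt l
  have hvs : l.map (·.1) ≠ [] := by simpa using hpre
  unfold get_highest_version_py get_highest_version_py_alt
  simp only [foldl_snd, List.nil_append]
  set s := PySem.List.sorted (l.map (·.1)) (fun x => x) false with hs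
  have hsne : s ≠ [] := by
    intro hnil
    exact hvs ((PySem.List.sorted_eq_nil_iff _ _ _).mp hnil)
  rw [pyGet_neg_one_last s hsne]
  obtain ⟨m, hm⟩ : ∃ m, PySem.List.max? (l.map (·.1)) (fun x => x) = some m := by
    cases hmx : PySem.List.max? (l.map (·.1)) (fun x => x) with
    | none => exact absurd ((PySem.List.max?_eq_none_iff _ _).mp hmx) hvs
    | some m => exact ⟨m, rfl⟩
  rw [hm]
  -- the last element of the sorted version list IS the maximum m
  have hlast : s.getLast hsne = m := by
    have hmem_last : s.getLast hsne ∈ l.map (·.1) :=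
      (PySem.List.mem_sorted _ _ _ _).mp (List.getLast_mem hsne)
    have hle : s.getLast hsne ≤ m := PySem.List.max?_isMax hm _ hmem_last
    have hmem_m : m ∈ s :=
      (PySem.List.mem_sorted _ _ _ _).mpr (PySem.List.max?_mem hm)
    obtain ⟨p, hp, hpe⟩ := List.getElem_of_mem hmem_m
    have hlen : s.length - 1 < s.length := Nat.sub_lt (List.length_pos_iff.mpr hsne) one_pos
    have hge : m ≤ s.getLast hsne := by
      rw [List.getLast_eq_getElem, ← hpe]
      have h2 : s.length - 1 < (PySem.List.sorted (l.map (·.1)) (fun x => x) false).length := by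
        rw [← hs]; exact hlen
      have h3 := PySem.List.sorted_id_getElem_mono (l.map (·.1)) (p := p)
        (q := s.length - 1) (by omega) h2
      simpa [← hs] using h3
    omega
  rw [hlast]
  simp only [foldl_fst_getD]
  simp
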